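-- pv_equiv track=rewrite | github.com/MAnxo7/Redes-Neuronales-Aprendizaje | Attention/encoder_mini_transformer/src/data.py | rule_1_9
-- ===== SOURCE A (Python) =====
-- def rule_1_9(seq):
--     toret = False
--
--     if(isinstance(seq,list)):
--         ssize = len(seq)-1
--     else:
--          ssize = seq.size(0)-1
--
--     for i in range(0,ssize):
--         if (seq[i] == 0):
--             break
--         elif (seq[i] == 1 and seq[i+1] == 9):
--             toret = True
--             break
--     return toret
-- ===== SOURCE B (Python) =====
-- def rule_1_9(seq):
--     if isinstance(seq, list):
--         n = len(seq)
--     else: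
--         n = seq.size(0)
--     # first pass: cutoff = position of the first 0 among indices 0..n-2 (the
--     # last element is never a terminator), defaulting to n-1 if no 0 appears
--     cutoff = next((j for j in range(n - 1) if seq[j] == 0), n - 1)
--     # second pass: does the pattern 1,9 start anywhere before the cutoff?
--     return any(seq[i] == 1 and seq[i + 1] == 9 for i in range(cutoff))
-- ===== Notes on version B (the rewrite author's own statement) =====
-- stated objective: alternative
-- what changed: A's single fused loop with two break conditions is decomposed into two separate passes: first find the cutoff (index of the first 0 among positions 0..len-2, defaulting to len-1), then test with any() whether the pattern 1,9 starts at any index before that cutoff.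
import Mathlib
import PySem

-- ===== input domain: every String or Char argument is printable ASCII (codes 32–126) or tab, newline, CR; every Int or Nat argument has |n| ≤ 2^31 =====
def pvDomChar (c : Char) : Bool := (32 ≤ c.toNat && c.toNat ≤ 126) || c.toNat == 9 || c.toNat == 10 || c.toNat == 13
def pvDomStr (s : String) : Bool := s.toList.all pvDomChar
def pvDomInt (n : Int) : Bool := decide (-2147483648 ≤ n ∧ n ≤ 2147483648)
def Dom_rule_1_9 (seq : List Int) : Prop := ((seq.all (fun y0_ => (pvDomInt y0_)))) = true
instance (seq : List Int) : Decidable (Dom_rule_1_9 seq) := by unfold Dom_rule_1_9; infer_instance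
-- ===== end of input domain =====

-- B decomposes A's single fused break-loop into two passes (find the first-0 cutoff, then
-- search the prefix for the pattern 1,9); objective: alternative decomposition, same cost.

-- ===== PORT A =====
-- the for-loop with its two break conditions, over the index list range(0, ssize)
def ruleALoop (seq : List Int) : List Int → Bool
  | [] => false
  | i :: rest =>
    if PySem.List.pyGetD seq i 0 == 0 then false
    else if PySem.List.pyGetD seq i 0 == 1 && PySem.List.pyGetD seq (i + 1) 0 == 9 then true
    else ruleALoop seq rest

def rule_1_9 (seq : List Int) : Bool :=
  let ssize : Int := (seq.length : Int) - 1
  ruleALoop seq (PySem.List.pyRange 0 ssize 1)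

-- ===== PORT B =====
def rule_1_9_alt (seq : List Int) : Bool :=
  let n := seq.length
  let cutoff := (((List.range (n - 1)).find? (fun j => seq.getD j 0 == 0)).getD (n - 1))
  (List.range cutoff).any (fun i => seq.getD i 0 == 1 && seq.getD (i + 1) 0 == 9)

-- ===== PRECONDITION & SPEC =====
def Spec_rule_1_9 (seq : List Int) (out : Bool) : Prop := out = rule_1_9_alt seq
instance (seq : List Int) (out : Bool) : Decidable (Spec_rule_1_9 seq out) := by unfold Spec_rule_1_9; infer_instance

-- ===== CLAIM (what is proved, stated in full; the proofs are below) =====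
def Claim_equal_rule_1_9 : Prop := ∀ (seq : List Int), Dom_rule_1_9 seq → Spec_rule_1_9 seq (rule_1_9 seq)

-- ===== LEMMAS AND PROOFS =====

lemma find?_range'_ge (seq : List Int) (start cnt j : Nat)
    (h : (List.range' start cnt).find? (fun j => seq.getD j 0 == 0) = some j) :
    start ≤ j := by
  have := List.mem_of_find?_eq_some h
  simp [List.mem_range'] at this
  omega

-- the fused loop over indices start..start+cnt-1 equals: cutoff = first 0 (default end), then
-- search the pattern below the cutoff
lemma loop_eq (seq : List Int) : ∀ (cnt start : Nat),
    ruleALoop seq ((List.range' start cnt).map (fun k : Nat => (k : Int)))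
      = (List.range' start
          ((((List.range' start cnt).find? (fun j => seq.getD j 0 == 0)).getD (start + cnt)) - start)).any
          (fun i => seq.getD i 0 == 1 && seq.getD (i + 1) 0 == 9) := by
  intro cnt
  induction cnt with
  | zero => intro start; simp [ruleALoop]
  | succ m ih =>
    intro start
    rw [List.range'_succ, List.map_cons]
    have g1 : PySem.List.pyGetD seq ((start : Int)) 0 = seq.getD start 0 :=
      PySem.List.pyGetD_natCast seq start 0
    have g2 : PySem.List.pyGetD seq ((start : Int) + 1) 0 = seq.getD (start + 1) 0 := by
      have : ((start : Int) + 1) = ((start + 1 : Nat) : Int) := by omega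
      rw [this]; exact PySem.List.pyGetD_natCast seq (start + 1) 0
    show (if (PySem.List.pyGetD seq ((start : Int)) 0 == 0) = true then false
          else if (PySem.List.pyGetD seq ((start : Int)) 0 == 1
                    && PySem.List.pyGetD seq ((start : Int) + 1) 0 == 9) = true then true
          else ruleALoop seq ((List.range' (start + 1) m).map (fun k : Nat => (k : Int)))) = _
    rw [g1, g2]
    by_cases h0 : (seq.getD start 0 == 0) = true
    · rw [if_pos h0, List.find?_cons_of_pos (p := fun j => seq.getD j 0 == 0) (a := start) h0]
      simp
    · rw [if_neg h0, List.find?_cons_of_neg (p := fun j => seq.getD j 0 == 0) (a := start) h0]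
      set c := (((List.range' (start + 1) m).find? (fun j => seq.getD j 0 == 0)).getD (start + 1 + m)) with hc
      have hcge : start + 1 ≤ c := by
        rcases hfind : (List.range' (start + 1) m).find? (fun j => seq.getD j 0 == 0) with _ | j
        · rw [hc, hfind]; simp only [Option.getD_none]; omega
        · have hj := find?_range'_ge seq _ _ _ hfind
          rw [hc, hfind]; simp only [Option.getD_some]; exact hj
      rw [show start + (m + 1) = start + 1 + m from by omega, ← hc]
      by_cases hp : (seq.getD start 0 == 1 && seq.getD (start + 1) 0 == 9) = true
      · rw [if_pos hp]
        symm
        rw [List.any_eq_true]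
        exact ⟨start, by simp [List.mem_range']; omega, hp⟩
      · rw [if_neg hp, show c - start = (c - (start + 1)) + 1 from by omega,
            List.range'_succ, List.any_cons, Bool.eq_false_iff.mpr hp, Bool.false_or,
            ih (start + 1), hc]

lemma ruleALoop_pyRange (seq : List Int) (m : Nat) :
    ruleALoop seq (PySem.List.pyRange 0 (m : Int) 1)
      = ruleALoop seq ((List.range' 0 m).map (fun k : Nat => (k : Int))) := by
  rw [PySem.List.pyRange_one, show ((m : Int) - 0).toNat = m from by omega,
      List.range_eq_range']
  congr 1
  exact List.map_congr_left (fun x _ => by omega)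

-- ===== VERDICT (by name: the statement is the Claim_ definition above) =====
theorem rule_1_9_spec : Claim_equal_rule_1_9 := by
  intro seq _
  unfold Spec_rule_1_9 rule_1_9 rule_1_9_alt
  by_cases hn : seq = []
  · subst hn; decide
  · have hlen : 1 ≤ seq.length := by
      cases seq with
      | nil => exact absurd rfl hn
      | cons a l => simp
    have hm : ((seq.length : Int) - 1) = ((seq.length - 1 : Nat) : Int) := by omega
    rw [hm, ruleALoop_pyRange, loop_eq]
    simp [List.range_eq_range']
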